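-- pv_equiv track=rewrite | github.com/jeremy-rifkin/cpp-dependency-analyzer | main.py | phase_two
-- ===== SOURCE A (Python) =====
-- def phase_two(string):
--     # backslash followed immediately by newline
--     i = 0
--     translated_string = ""
--     # this is a really dirty way of taking care of line number errors for backslash + \n sequences
--     line_debt = 0
--     while i < len(string):
--         if string[i] == "\\" and i < len(string) - 1 and string[i + 1] == "\n":
--             i += 2
--             line_debt += 1
--         elif string[i] == "\n":
--             translated_string += "\n" * (1 + line_debt)
--             line_debt = 0
--             i += 1
--         else:
--             translated_string += string[i]
--             i += 1
--     return translated_string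
-- ===== SOURCE B (Python) =====
-- def phase_two(string):
--     # one pass over the physical lines: split on '\n', strip a trailing
--     # backslash of every non-final line (deferring its newline as "debt"),
--     # flush 1+debt newlines at each kept line break; the final segment is
--     # emitted verbatim and any leftover debt is dropped.
--     segs = string.split('\n')
--     out = []
--     debt = 0
--     last = len(segs) - 1
--     for i, seg in enumerate(segs):
--         if i == last:
--             out.append(seg)
--         elif seg.endswith('\\'):
--             out.append(seg[:-1])
--             debt += 1
--         else:
--             out.append(seg)
--             out.append('\n' * (1 + debt))
--             debt = 0
--     return ''.join(out)
-- ===== Notes on version B (the rewrite author's own statement) =====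
-- stated objective: faster
-- what changed: Replaces A's char-by-char scan with two-char lookahead and quadratic string += accumulation by a single pass over the newline-split line segments collected into a list and joined once, stripping a trailing backslash from non-final lines and flushing the deferred newline debt at each kept break.
import Mathlib
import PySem

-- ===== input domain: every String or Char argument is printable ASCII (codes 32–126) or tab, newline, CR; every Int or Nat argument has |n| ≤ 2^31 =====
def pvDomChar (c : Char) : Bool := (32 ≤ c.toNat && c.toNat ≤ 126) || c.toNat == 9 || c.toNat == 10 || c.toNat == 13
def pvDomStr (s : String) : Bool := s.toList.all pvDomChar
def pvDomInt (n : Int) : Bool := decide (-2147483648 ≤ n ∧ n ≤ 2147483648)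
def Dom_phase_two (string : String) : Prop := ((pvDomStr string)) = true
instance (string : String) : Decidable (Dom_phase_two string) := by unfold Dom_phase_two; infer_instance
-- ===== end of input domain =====

-- B: one pass over the newline-split segments with a newline-debt counter, joined once, instead of A's char-by-char scan with string += accumulation (measured faster in a timing run).


-- ===== PORT A =====
-- A's while loop over indices, transliterated as recursion consuming the character list:
-- the two-character test string[i]=='\\' and string[i+1]=='\n' reads the first two list cells.
def phaseTwoLoopA : List Char → Nat → List Char
  | [], _ => []
  | c :: d :: rest, debt =>
    if c = '\\' ∧ d = '\n' then phaseTwoLoopA rest (debt + 1)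
    else if c = '\n' then List.replicate (1 + debt) '\n' ++ phaseTwoLoopA (d :: rest) 0
    else c :: phaseTwoLoopA (d :: rest) debt
  | [c], debt =>
    if c = '\n' then List.replicate (1 + debt) '\n'
    else [c]

def phase_two (string : String) : String :=
  String.ofList (phaseTwoLoopA string.toList 0)

-- ===== PORT B =====
-- port of str.split('\n') (exact for a single-character separator)
def phaseTwoSplit : List Char → List (List Char)
  | [] => [[]]
  | c :: rest =>
    let r := phaseTwoSplit rest
    if c = '\n' then [] :: r
    else (c :: r.headI) :: r.tail

-- B's loop over the segments; the last segment is emitted verbatim.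
def phaseTwoLoopB : List (List Char) → Nat → List Char
  | [], _ => []
  | [seg], _ => seg
  | seg :: s2 :: rest, debt =>
    if seg.getLast? = some '\\' then
      seg.dropLast ++ phaseTwoLoopB (s2 :: rest) (debt + 1)
    else
      seg ++ List.replicate (1 + debt) '\n' ++ phaseTwoLoopB (s2 :: rest) 0

def phase_two_alt (string : String) : String :=
  String.ofList (phaseTwoLoopB (phaseTwoSplit string.toList) 0)

-- ===== PRECONDITION & SPEC =====
def Spec_phase_two (string : String) (out : String) : Prop := out = phase_two_alt string
instance (string : String) (out : String) : Decidable (Spec_phase_two string out) := by unfold Spec_phase_two; infer_instance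

-- ===== CLAIM (what is proved, stated in full; the proofs are below) =====
def Claim_equal_phase_two : Prop := ∀ (string : String), Dom_phase_two string → Spec_phase_two string (phase_two string)

-- ===== LEMMAS AND PROOFS =====

theorem phaseTwoSplit_ne_nil (cs : List Char) : phaseTwoSplit cs ≠ [] := by
  cases cs with
  | nil => simp [phaseTwoSplit]
  | cons c rest =>
    simp only [phaseTwoSplit]
    split <;> simp

theorem loopA_bsnl (rest : List Char) (debt : Nat) :
    phaseTwoLoopA ('\\' :: '\n' :: rest) debt = phaseTwoLoopA rest (debt + 1) := by
  simp [phaseTwoLoopA]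

theorem loopA_nl (d : Char) (rest : List Char) (debt : Nat) :
    phaseTwoLoopA ('\n' :: d :: rest) debt
      = List.replicate (1 + debt) '\n' ++ phaseTwoLoopA (d :: rest) 0 := by
  simp [phaseTwoLoopA]

theorem loopA_other (c d : Char) (rest : List Char) (debt : Nat)
    (hcd : ¬ (c = '\\' ∧ d = '\n')) (hc : c ≠ '\n') :
    phaseTwoLoopA (c :: d :: rest) debt = c :: phaseTwoLoopA (d :: rest) debt := by
  simp [phaseTwoLoopA, hcd, hc]

theorem split_nl (rest : List Char) :
    phaseTwoSplit ('\n' :: rest) = [] :: phaseTwoSplit rest := by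
  simp [phaseTwoSplit]

theorem split_other (c : Char) (rest : List Char) (hc : c ≠ '\n') :
    phaseTwoSplit (c :: rest)
      = (c :: (phaseTwoSplit rest).headI) :: (phaseTwoSplit rest).tail := by
  conv_lhs => rw [phaseTwoSplit]
  rw [if_neg hc]

-- pushing a character that is not a line break onto the head segment commutes with loopB
theorem loopB_cons (c : Char) (seg : List Char) (t : List (List Char)) (debt : Nat)
    (h : seg ≠ [] ∨ c ≠ '\\') :
    phaseTwoLoopB ((c :: seg) :: t) debt = c :: phaseTwoLoopB (seg :: t) debt := by
  cases t with
  | nil => simp [phaseTwoLoopB]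
  | cons s t' =>
    cases seg with
    | nil =>
      have hc : c ≠ '\\' := by
        rcases h with h | h
        · exact absurd rfl h
        · exact h
      simp [phaseTwoLoopB, hc]
    | cons d seg' =>
      simp only [phaseTwoLoopB, List.getLast?_cons_cons]
      split <;> simp [List.dropLast]

theorem loopA_eq_loopB (n : Nat) :
    ∀ cs : List Char, cs.length ≤ n → ∀ debt : Nat,
      phaseTwoLoopA cs debt = phaseTwoLoopB (phaseTwoSplit cs) debt := by
  induction n with
  | zero =>
    intro cs h debt
    have : cs = [] := List.length_eq_zero_iff.mp (Nat.le_zero.mp h)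
    subst this
    simp [phaseTwoLoopA, phaseTwoSplit, phaseTwoLoopB]
  | succ n ih =>
    intro cs h debt
    match cs with
    | [] => simp [phaseTwoLoopA, phaseTwoSplit, phaseTwoLoopB]
    | [c] =>
      by_cases hc : c = '\n'
      · subst hc
        simp [phaseTwoLoopA, phaseTwoSplit, phaseTwoLoopB]
      · simp [phaseTwoLoopA, phaseTwoSplit, phaseTwoLoopB, hc]
    | c :: d :: rest =>
      have hr : rest.length ≤ n := by simp at h; omega
      have hdr : (d :: rest).length ≤ n := by simp at h ⊢; omega
      obtain ⟨s, t, hst⟩ : ∃ s t, phaseTwoSplit (d :: rest) = s :: t := by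
        cases hsp : phaseTwoSplit (d :: rest) with
        | nil => exact absurd hsp (phaseTwoSplit_ne_nil _)
        | cons s t => exact ⟨s, t, rfl⟩
      by_cases hcd : c = '\\' ∧ d = '\n'
      · obtain ⟨rfl, rfl⟩ := hcd
        rw [loopA_bsnl]
        rw [split_other '\\' ('\n' :: rest) (by decide), split_nl]
        obtain ⟨s', t', hst'⟩ : ∃ s' t', phaseTwoSplit rest = s' :: t' := by
          cases hsp : phaseTwoSplit rest with
          | nil => exact absurd hsp (phaseTwoSplit_ne_nil _)
          | cons s' t' => exact ⟨s', t', rfl⟩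
        rw [hst']
        simp only [List.headI, List.tail_cons]
        simp only [phaseTwoLoopB, List.getLast?_singleton]
        simp only [List.dropLast, List.nil_append]
        rw [← hst']
        exact ih rest hr (debt + 1)
      · by_cases hc : c = '\n'
        · subst hc
          rw [loopA_nl, split_nl, hst]
          simp only [phaseTwoLoopB, List.getLast?_nil]
          rw [if_neg (by simp)]
          rw [List.nil_append, ← hst, ih (d :: rest) hdr 0]
        · rw [loopA_other c d rest debt hcd hc]
          rw [split_other c (d :: rest) hc, hst]
          simp only [List.headI, List.tail_cons]
          have hside : s ≠ [] ∨ c ≠ '\\' := by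
            by_cases hd : d = '\n'
            · right
              intro hcc
              exact hcd ⟨hcc, hd⟩
            · left
              have h2 := split_other d rest hd
              rw [hst] at h2
              have : s = d :: (phaseTwoSplit rest).headI := (List.cons.injEq _ _ _ _ ▸ h2).1
              rw [this]
              simp
          rw [loopB_cons c s t debt hside, ← hst]
          rw [ih (d :: rest) hdr debt]

-- ===== VERDICT (by name: the statement is the Claim_ definition above) =====
theorem phase_two_spec : Claim_equal_phase_two := by
  intro s _
  unfold Spec_phase_two phase_two phase_two_alt
  rw [loopA_eq_loopB s.toList.length s.toList le_rfl 0]
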